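-- pv_equiv track=rewrite | github.com/fatcrapinmybutt/fredprime-legal-system | tools/adversarial_signal_suite/adversarial_signal_suite.py | find_actor_tags
-- ===== SOURCE A (Python) =====
-- from typing import Any, Dict, Iterable, List, Optional, Tuple
--
-- def find_actor_tags(text: str, actors: Dict[str, List[str]]) -> List[str]:
--     tags = []
--     low = text.lower()
--     for role, names in actors.items():
--         for name in names:
--             if name and name.lower() in low:
--                 tags.append(role)
--                 break
--     return sorted(set(tags))
-- ===== SOURCE B (Python) =====
-- def find_actor_tags(text, actors):
--     low = text.lower()
--     # index: lowered name -> set of roles carrying it; then one sweep over text positions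
--     patterns = {}
--     for role, names in actors.items():
--         for n in names:
--             if n:
--                 patterns.setdefault(n.lower(), set()).add(role)
--     lengths = sorted({len(p) for p in patterns})
--     roles = set()
--     for i in range(len(low)):
--         for L in lengths:
--             w = low[i:i + L]
--             if len(w) == L and w in patterns:
--                 roles |= patterns[w]
--     return sorted(roles)
-- ===== Notes on version B (the rewrite author's own statement) =====
-- stated objective: alternative
-- what changed: B inverts the traversal: it builds a hash index from lowered name to the set of roles carrying it, then makes a single sweep over the text positions testing each window length against the index, instead of A's nested per-role per-name substring scans; the role sets found are unioned and sorted.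
import Mathlib
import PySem

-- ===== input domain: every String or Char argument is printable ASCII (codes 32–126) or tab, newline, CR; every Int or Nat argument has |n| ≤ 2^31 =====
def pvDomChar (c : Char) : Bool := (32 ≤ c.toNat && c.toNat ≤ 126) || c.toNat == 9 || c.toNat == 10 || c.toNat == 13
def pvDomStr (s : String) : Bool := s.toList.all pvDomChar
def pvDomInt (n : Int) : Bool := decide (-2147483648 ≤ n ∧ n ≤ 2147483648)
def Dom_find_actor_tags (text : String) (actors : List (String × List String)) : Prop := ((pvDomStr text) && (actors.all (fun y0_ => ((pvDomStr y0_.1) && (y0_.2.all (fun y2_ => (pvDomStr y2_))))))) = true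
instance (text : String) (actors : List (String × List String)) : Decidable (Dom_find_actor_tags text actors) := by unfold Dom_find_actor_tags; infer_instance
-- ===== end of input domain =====

-- B inverts the traversal: a hash index from lowered name to its roles, then one sweep
-- over the text positions testing each window length (alternative decomposition, same value).

-- ===== PORT A =====
-- inner 'for name in names: … break' loop of A
def pvGoA (low role : String) (names : List String) (tags : List String) : List String :=
  match names with
  | [] => tags
  | n :: rest =>
    if (!(n == "") && PySem.Str.isIn (PySem.Str.lower n) low) then tags ++ [role]
    else pvGoA low role rest tags

def find_actor_tags (text : String) (actors : List (String × List String)) : List String :=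
  let low := PySem.Str.lower text
  let tags := actors.foldl (fun tags p => pvGoA low p.1 p.2 tags) []
  PySem.List.sorted (PySem.Set.ofList tags) (fun x => x) false

-- ===== PORT B =====
-- patterns.setdefault(n.lower(), set()).add(role)  (insert keeps position, appends if new)
def pvAddNames (role : String) (names : List String) (d : PySem.Dict String (PySem.Set String)) :
    PySem.Dict String (PySem.Set String) :=
  names.foldl (fun d n =>
    if n == "" then d
    else PySem.Dict.insert d (PySem.Str.lower n)
      (PySem.Set.add (PySem.Dict.getD d (PySem.Str.lower n) PySem.Set.empty) role)) d

def pvBuild (actors : List (String × List String)) : PySem.Dict String (PySem.Set String) :=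
  actors.foldl (fun d p => pvAddNames p.1 p.2 d) PySem.Dict.empty

def find_actor_tags_alt (text : String) (actors : List (String × List String)) : List String :=
  let low := PySem.Str.lower text
  let patterns := pvBuild actors
  let lengths := PySem.List.sorted
    (PySem.Set.ofList ((PySem.Dict.keys patterns).map PySem.Str.len)) (fun x => x) false
  let roles := (PySem.List.pyRange 0 (PySem.Str.len low) 1).foldl (fun rs i =>
    lengths.foldl (fun rs L =>
      let w := PySem.Str.slice low (some i) (some (i + L))
      if PySem.Str.len w == L && PySem.Dict.contains patterns w
      then PySem.Set.union rs (PySem.Dict.getD patterns w PySem.Set.empty)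
      else rs) rs) PySem.Set.empty
  PySem.List.sorted roles (fun x => x) false

-- ===== PRECONDITION & SPEC =====
def Spec_find_actor_tags (text : String) (actors : List (String × List String)) (out : List String) : Prop := out = find_actor_tags_alt text actors
instance (text : String) (actors : List (String × List String)) (out : List String) : Decidable (Spec_find_actor_tags text actors out) := by unfold Spec_find_actor_tags; infer_instance

-- ===== CLAIM (what is proved, stated in full; the proofs are below) =====
def Claim_equal_find_actor_tags : Prop := ∀ (text : String) (actors : List (String × List String)), Dom_find_actor_tags text actors → Spec_find_actor_tags text actors (find_actor_tags text actors)

-- ===== LEMMAS AND PROOFS =====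

-- the matching condition both sides decide, per (role, names) pair
def pvMatches (low : String) (p : String × List String) : Prop :=
  ∃ n ∈ p.2, n ≠ "" ∧ PySem.Str.isIn (PySem.Str.lower n) low = true

-- ---------- A side ----------

theorem pvGoA_eq (low role : String) (names : List String) (tags : List String) :
    pvGoA low role names tags =
      if names.any (fun n => !(n == "") && PySem.Str.isIn (PySem.Str.lower n) low)
      then tags ++ [role] else tags := by
  induction names with
  | nil => simp [pvGoA]
  | cons n rest ih =>
    simp only [pvGoA, List.any_cons, ih]
    by_cases h : (!(n == "") && PySem.Str.isIn (PySem.Str.lower n) low) = true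
    · rw [if_pos h, if_pos (by rw [h, Bool.true_or])]
    · rw [Bool.not_eq_true] at h
      rw [if_neg (by rw [h]; exact Bool.false_ne_true)]
      simp only [h, Bool.false_or]

theorem pv_mem_A (low r : String) (actors : List (String × List String)) :
    (r ∈ actors.foldl (fun tags p => pvGoA low p.1 p.2 tags) []) ↔
      ∃ p ∈ actors, p.1 = r ∧ pvMatches low p := by
  simp only [pvGoA_eq, PySem.List.foldl_append_if]
  simp only [List.nil_append, List.mem_map, List.mem_filter, pvMatches, List.any_eq_true]
  constructor
  · rintro ⟨p, ⟨hp, hc⟩, hr⟩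
    obtain ⟨n, hn, h⟩ := hc
    rw [Bool.and_eq_true] at h
    exact ⟨p, hp, hr, n, hn, by simpa using h.1, h.2⟩
  · rintro ⟨p, hp, hr, n, hn, hne, hin⟩
    exact ⟨p, ⟨hp, ⟨n, hn, by rw [Bool.and_eq_true]; exact ⟨by simpa using hne, hin⟩⟩⟩, hr⟩

-- ---------- B side: the index ----------

theorem pv_getD_addNames (role : String) (names : List String)
    (d : PySem.Dict String (PySem.Set String)) (k r : String) :
    (r ∈ PySem.Dict.getD (pvAddNames role names d) k PySem.Set.empty) ↔
      r ∈ PySem.Dict.getD d k PySem.Set.empty ∨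
        (r = role ∧ ∃ n ∈ names, n ≠ "" ∧ PySem.Str.lower n = k) := by
  induction names generalizing d with
  | nil => simp [pvAddNames]
  | cons n rest ih =>
    have hcons : pvAddNames role (n :: rest) d = pvAddNames role rest
        (if (n == "") = true then d
         else PySem.Dict.insert d (PySem.Str.lower n)
           (PySem.Set.add (PySem.Dict.getD d (PySem.Str.lower n) PySem.Set.empty) role)) := rfl
    rw [hcons, ih]
    by_cases he : n = ""
    · rw [if_pos (by simp [he])]
      constructor
      · rintro (h | ⟨hr, m, hm, hmne, hml⟩)
        · exact Or.inl h
        · exact Or.inr ⟨hr, m, List.mem_cons_of_mem _ hm, hmne, hml⟩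
      · rintro (h | ⟨hr, m, hm, hmne, hml⟩)
        · exact Or.inl h
        · rcases List.mem_cons.1 hm with rfl | hm
          · exact absurd he hmne
          · exact Or.inr ⟨hr, m, hm, hmne, hml⟩
    · rw [if_neg (by simp [he]), PySem.Dict.getD_insert]
      by_cases hk : k = PySem.Str.lower n
      · rw [if_pos hk]
        rw [PySem.Set.mem_add]
        constructor
        · rintro ((h | hr) | ⟨hr, m, hm, hmne, hml⟩)
          · exact Or.inl (by rwa [hk])
          · exact Or.inr ⟨hr, n, List.mem_cons_self .., he, hk.symm⟩
          · exact Or.inr ⟨hr, m, List.mem_cons_of_mem _ hm, hmne, hml⟩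
        · rintro (h | ⟨hr, m, hm, hmne, hml⟩)
          · exact Or.inl (Or.inl (by rwa [hk] at h))
          · rcases List.mem_cons.1 hm with rfl | hm
            · exact Or.inl (Or.inr hr)
            · exact Or.inr ⟨hr, m, hm, hmne, hml⟩
      · rw [if_neg hk]
        constructor
        · rintro (h | ⟨hr, m, hm, hmne, hml⟩)
          · exact Or.inl h
          · exact Or.inr ⟨hr, m, List.mem_cons_of_mem _ hm, hmne, hml⟩
        · rintro (h | ⟨hr, m, hm, hmne, hml⟩)
          · exact Or.inl h
          · rcases List.mem_cons.1 hm with rfl | hm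
            · exact absurd hml.symm hk
            · exact Or.inr ⟨hr, m, hm, hmne, hml⟩

theorem pv_contains_addNames (role : String) (names : List String)
    (d : PySem.Dict String (PySem.Set String)) (k : String) :
    (PySem.Dict.contains (pvAddNames role names d) k = true) ↔
      PySem.Dict.contains d k = true ∨ ∃ n ∈ names, n ≠ "" ∧ PySem.Str.lower n = k := by
  induction names generalizing d with
  | nil => simp [pvAddNames]
  | cons n rest ih =>
    have hcons : pvAddNames role (n :: rest) d = pvAddNames role rest
        (if (n == "") = true then d
         else PySem.Dict.insert d (PySem.Str.lower n)
           (PySem.Set.add (PySem.Dict.getD d (PySem.Str.lower n) PySem.Set.empty) role)) := rfl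
    rw [hcons, ih]
    by_cases he : n = ""
    · rw [if_pos (by simp [he])]
      constructor
      · rintro (h | ⟨m, hm, hmne, hml⟩)
        · exact Or.inl h
        · exact Or.inr ⟨m, List.mem_cons_of_mem _ hm, hmne, hml⟩
      · rintro (h | ⟨m, hm, hmne, hml⟩)
        · exact Or.inl h
        · rcases List.mem_cons.1 hm with rfl | hm
          · exact absurd he hmne
          · exact Or.inr ⟨m, hm, hmne, hml⟩
    · rw [if_neg (by simp [he]), PySem.Dict.contains_insert]
      simp only [Bool.or_eq_true, beq_iff_eq]
      constructor
      · rintro (⟨h | h⟩ | ⟨m, hm, hmne, hml⟩)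
        · exact Or.inr ⟨n, List.mem_cons_self .., he, h.symm⟩
        · exact Or.inl h
        · exact Or.inr ⟨m, List.mem_cons_of_mem _ hm, hmne, hml⟩
      · rintro (h | ⟨m, hm, hmne, hml⟩)
        · exact Or.inl (Or.inr h)
        · rcases List.mem_cons.1 hm with rfl | hm
          · exact Or.inl (Or.inl hml.symm)
          · exact Or.inr ⟨m, hm, hmne, hml⟩

theorem pv_getD_build (actors : List (String × List String)) (k r : String) :
    (r ∈ PySem.Dict.getD (pvBuild actors) k PySem.Set.empty) ↔
      ∃ p ∈ actors, p.1 = r ∧ ∃ n ∈ p.2, n ≠ "" ∧ PySem.Str.lower n = k := by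
  unfold pvBuild
  suffices h : ∀ d, (r ∈ PySem.Dict.getD (actors.foldl (fun d p => pvAddNames p.1 p.2 d) d) k PySem.Set.empty) ↔
      r ∈ PySem.Dict.getD d k PySem.Set.empty ∨ ∃ p ∈ actors, p.1 = r ∧ ∃ n ∈ p.2, n ≠ "" ∧ PySem.Str.lower n = k by
    rw [h]; simp [PySem.Dict.getD_empty, PySem.Set.empty]
  induction actors with
  | nil => simp
  | cons p rest ih =>
    intro d
    simp only [List.foldl_cons, ih, pv_getD_addNames, List.mem_cons]
    constructor
    · rintro (⟨h | ⟨hr, hn⟩⟩ | ⟨q, hq, hqr, hn⟩)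
      · exact Or.inl h
      · exact Or.inr ⟨p, Or.inl rfl, hr.symm, hn⟩
      · exact Or.inr ⟨q, Or.inr hq, hqr, hn⟩
    · rintro (h | ⟨q, hq | hq, hqr, hn⟩)
      · exact Or.inl (Or.inl h)
      · subst hq; exact Or.inl (Or.inr ⟨hqr.symm, hn⟩)
      · exact Or.inr ⟨q, hq, hqr, hn⟩

theorem pv_contains_build (actors : List (String × List String)) (k : String) :
    (PySem.Dict.contains (pvBuild actors) k = true) ↔
      ∃ p ∈ actors, ∃ n ∈ p.2, n ≠ "" ∧ PySem.Str.lower n = k := by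
  unfold pvBuild
  suffices h : ∀ d, (PySem.Dict.contains (actors.foldl (fun d p => pvAddNames p.1 p.2 d) d) k = true) ↔
      PySem.Dict.contains d k = true ∨ ∃ p ∈ actors, ∃ n ∈ p.2, n ≠ "" ∧ PySem.Str.lower n = k by
    rw [h]; simp [PySem.Dict.contains_empty]
  induction actors with
  | nil => simp
  | cons p rest ih =>
    intro d
    simp only [List.foldl_cons, ih, pv_contains_addNames, List.mem_cons]
    constructor
    · rintro (⟨h | hn⟩ | ⟨q, hq, hn⟩)
      · exact Or.inl h
      · exact Or.inr ⟨p, Or.inl rfl, hn⟩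
      · exact Or.inr ⟨q, Or.inr hq, hn⟩
    · rintro (h | ⟨q, hq | hq, hn⟩)
      · exact Or.inl (Or.inl h)
      · subst hq; exact Or.inl (Or.inr hn)
      · exact Or.inr ⟨q, hq, hn⟩

-- ---------- generic fold-accumulator membership ----------

theorem pv_mem_foldl_or {γ : Type} (r : String) (l : List γ)
    (step : PySem.Set String → γ → PySem.Set String) (P : γ → Prop)
    (h : ∀ x rs, r ∈ step rs x ↔ r ∈ rs ∨ P x) (init : PySem.Set String) :
    (r ∈ l.foldl step init) ↔ r ∈ init ∨ ∃ x ∈ l, P x := by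
  induction l generalizing init with
  | nil => simp
  | cons x rest ih =>
    simp only [List.foldl_cons, ih, h, List.mem_cons]
    constructor
    · rintro (⟨h | h⟩ | ⟨y, hy, hP⟩)
      · exact Or.inl h
      · exact Or.inr ⟨x, Or.inl rfl, h⟩
      · exact Or.inr ⟨y, Or.inr hy, hP⟩
    · rintro (h | ⟨y, hy | hy, hP⟩)
      · exact Or.inl (Or.inl h)
      · subst hy; exact Or.inl (Or.inr hP)
      · exact Or.inr ⟨y, hy, hP⟩

theorem pv_nodup_foldl {γ : Type} (l : List γ)
    (step : PySem.Set String → γ → PySem.Set String)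
    (h : ∀ x rs, rs.Nodup → (step rs x).Nodup) (init : PySem.Set String)
    (hi : init.Nodup) : (l.foldl step init).Nodup := by
  induction l generalizing init with
  | nil => exact hi
  | cons x rest ih => exact ih _ (h x init hi)

-- ---------- B side: the sweep ----------

theorem pv_mem_B (text : String) (actors : List (String × List String)) (r : String) :
    (r ∈ (PySem.List.pyRange 0 (PySem.Str.len (PySem.Str.lower text)) 1).foldl (fun rs i =>
        (PySem.List.sorted (PySem.Set.ofList ((PySem.Dict.keys (pvBuild actors)).map PySem.Str.len)) (fun x => x) false).foldl (fun rs L =>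
          let w := PySem.Str.slice (PySem.Str.lower text) (some i) (some (i + L))
          if PySem.Str.len w == L && PySem.Dict.contains (pvBuild actors) w
          then PySem.Set.union rs (PySem.Dict.getD (pvBuild actors) w PySem.Set.empty)
          else rs) rs) PySem.Set.empty) ↔
      ∃ p ∈ actors, p.1 = r ∧ pvMatches (PySem.Str.lower text) p := by
  set low := PySem.Str.lower text with hlow
  set patterns := pvBuild actors with hpat
  set lengths := PySem.List.sorted (PySem.Set.ofList ((PySem.Dict.keys patterns).map PySem.Str.len)) (fun x => x) false with hlen
  -- characterize the double fold
  have hinner : ∀ (i : Int) (rs : PySem.Set String),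
      (r ∈ lengths.foldl (fun rs L =>
          let w := PySem.Str.slice low (some i) (some (i + L))
          if PySem.Str.len w == L && PySem.Dict.contains patterns w
          then PySem.Set.union rs (PySem.Dict.getD patterns w PySem.Set.empty)
          else rs) rs) ↔
        r ∈ rs ∨ ∃ L ∈ lengths,
          (PySem.Str.len (PySem.Str.slice low (some i) (some (i + L))) == L && PySem.Dict.contains patterns (PySem.Str.slice low (some i) (some (i + L)))) = true ∧
          r ∈ PySem.Dict.getD patterns (PySem.Str.slice low (some i) (some (i + L))) PySem.Set.empty := by
    intro i rs
    refine pv_mem_foldl_or r lengths _ _ (fun L rs => ?_) rs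
    dsimp only
    by_cases hc : (PySem.Str.len (PySem.Str.slice low (some i) (some (i + L))) == L && PySem.Dict.contains patterns (PySem.Str.slice low (some i) (some (i + L)))) = true
    · rw [if_pos hc, PySem.Set.mem_union]; tauto
    · rw [if_neg hc]; tauto
  rw [pv_mem_foldl_or r _ _
    (fun i => ∃ L ∈ lengths,
      (PySem.Str.len (PySem.Str.slice low (some i) (some (i + L))) == L && PySem.Dict.contains patterns (PySem.Str.slice low (some i) (some (i + L)))) = true ∧
      r ∈ PySem.Dict.getD patterns (PySem.Str.slice low (some i) (some (i + L))) PySem.Set.empty)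
    hinner PySem.Set.empty]
  simp only [PySem.Set.empty, List.not_mem_nil, false_or]
  constructor
  · -- a window hit gives a matching pair
    rintro ⟨i, hi, L, hL, hcond, hmem⟩
    rw [PySem.List.mem_pyRange_one] at hi
    obtain ⟨p, hp, hpr, n, hn, hne, hnl⟩ := (pv_getD_build actors _ r).1 hmem
    refine ⟨p, hp, hpr, n, hn, hne, ?_⟩
    rw [hnl]
    -- the window is an infix of low
    have hL0 : 0 ≤ L := by
      rw [hlen] at hL
      rw [PySem.List.mem_sorted, PySem.Set.mem_ofList, List.mem_map] at hL
      obtain ⟨key, _, hkey⟩ := hL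
      rw [← hkey, PySem.Str.len_eq]; positivity
    rw [PySem.Str.isIn_eq]
    apply (PySem.Chars.exists_prefix_drop_iff_isIn _ _).1
    refine ⟨i.toNat, ?_⟩
    have : (PySem.Str.slice low (some i) (some (i + L))).toList =
        List.take ((i + L).toNat - i.toNat) (List.drop i.toNat low.toList) := by
      rw [PySem.Str.toList_slice, PySem.Chars.slice_eq_listSlice,
        PySem.List.slice_toNat _ hi.1 (by omega)]
    rw [this]
    exact List.take_prefix _ _
  · -- a matching pair gives a window hit
    rintro ⟨p, hp, hpr, n, hn, hne, hin⟩
    set k := PySem.Str.lower n with hk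
    have hkey : PySem.Dict.contains patterns k = true :=
      (pv_contains_build actors k).2 ⟨p, hp, n, hn, hne, rfl⟩
    have hkne : k.toList ≠ [] := by
      rw [hk, PySem.Str.toList_lower]
      simp only [PySem.Chars.lower, ne_eq, List.map_eq_nil_iff]
      intro h
      exact hne (String.toList_injective (by simp [h]))
    obtain ⟨j, hj⟩ := (PySem.Chars.exists_prefix_drop_iff_isIn k.toList low.toList).2
      (by rw [PySem.Str.isIn_eq] at hin; exact hin)
    have hjlt : j < low.toList.length := by
      by_contra h
      rw [List.drop_eq_nil_of_le (by omega)] at hj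
      exact hkne (List.prefix_nil.1 hj)
    set L := PySem.Str.len k with hLdef
    have hL : L ∈ lengths := by
      rw [hlen, PySem.List.mem_sorted, PySem.Set.mem_ofList, List.mem_map]
      exact ⟨k, (PySem.Dict.contains_iff_mem_keys patterns k).1 hkey, rfl⟩
    refine ⟨(j : Int), ?_, L, hL, ?_⟩
    · rw [PySem.List.mem_pyRange_one, PySem.Str.len_eq]
      constructor
      · positivity
      · exact_mod_cast hjlt
    · have hwk : PySem.Str.slice low (some (j : Int)) (some ((j : Int) + L)) = k := by
        apply String.toList_injective
        rw [PySem.Str.toList_slice, PySem.Chars.slice_eq_listSlice,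
          PySem.List.slice_toNat _ (by positivity) (by rw [hLdef, PySem.Str.len_eq]; positivity)]
        have hLl : L = (k.toList.length : Int) := by rw [hLdef, PySem.Str.len_eq]
        have : ((j : Int) + L).toNat - ((j : Int)).toNat = k.toList.length := by
          rw [hLl]; omega
        rw [this]
        exact ((List.prefix_iff_eq_take.1 hj).symm)
      rw [hwk]
      refine ⟨by simp [hkey, hLdef, PySem.Str.len_eq], ?_⟩
      exact (pv_getD_build actors k r).2 ⟨p, hp, hpr, n, hn, hne, rfl⟩

-- ---------- main ----------

theorem pv_main (text : String) (actors : List (String × List String)) :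
    find_actor_tags text actors = find_actor_tags_alt text actors := by
  unfold find_actor_tags find_actor_tags_alt
  simp only []
  rw [PySem.List.sorted_id_eq_sorted_id_iff_perm]
  apply (List.perm_ext_iff_of_nodup (PySem.Set.nodup_ofList _) ?nodup).2
  case nodup =>
    refine pv_nodup_foldl _ _ (fun i rs hrs => ?_) _ List.nodup_nil
    refine pv_nodup_foldl _ _ (fun L rs hrs => ?_) _ hrs
    dsimp only
    split_ifs with h
    · exact PySem.Set.nodup_union _ _ hrs
    · exact hrs
  intro r
  rw [PySem.Set.mem_ofList, pv_mem_A, pv_mem_B]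

-- ===== VERDICT (by name: the statement is the Claim_ definition above) =====
theorem find_actor_tags_spec : Claim_equal_find_actor_tags := by
  intro text actors _
  unfold Spec_find_actor_tags
  exact pv_main text actors
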